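-- pv_equiv track=rewrite | github.com/Eduxy/identificar-lista-crescente-decrescente | identifica_lista.py | confere_lista
-- ===== SOURCE A (Python) =====
-- def confere_lista(lista_numerica):
--
--     crescente = True
--     decrescente = True
--
--     for i in range(1,len(lista_numerica)):
--         if lista_numerica[i] > lista_numerica[i-1]:
--             decrescente = False
--         elif lista_numerica[i] < lista_numerica[i-1]:
--             crescente = False
--
--     if crescente:
--         return "crescente"
--     elif decrescente:
--         return "decrescente"
--     else:
--         return "não ordenada"
-- ===== SOURCE B (Python) =====
-- def confere_lista(lista_numerica):
--     # sort-and-compare instead of an adjacent-pair flag scan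
--     if lista_numerica == sorted(lista_numerica):
--         return "crescente"
--     if lista_numerica == sorted(lista_numerica, reverse=True):
--         return "decrescente"
--     return "não ordenada"
-- ===== Notes on version B (the rewrite author's own statement) =====
-- stated objective: idiomatic
-- what changed: Replaces the indexed adjacent-pair flag scan with comparing the list against its sorted and reverse-sorted copies.
import Mathlib
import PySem

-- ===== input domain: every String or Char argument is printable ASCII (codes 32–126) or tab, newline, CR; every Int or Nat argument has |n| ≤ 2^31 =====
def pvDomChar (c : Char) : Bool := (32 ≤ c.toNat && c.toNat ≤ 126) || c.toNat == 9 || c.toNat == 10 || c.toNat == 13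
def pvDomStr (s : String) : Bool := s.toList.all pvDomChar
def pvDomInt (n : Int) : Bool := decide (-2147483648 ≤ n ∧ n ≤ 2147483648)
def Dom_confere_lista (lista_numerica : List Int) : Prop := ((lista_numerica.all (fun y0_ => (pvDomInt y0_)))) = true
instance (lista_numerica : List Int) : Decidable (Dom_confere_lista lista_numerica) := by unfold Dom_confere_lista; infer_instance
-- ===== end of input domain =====

-- ===== PORT A =====
-- B compares the list with its sorted and reverse-sorted copies instead of A's indexed adjacent-pair flag scan (idiomatic rewrite; return value only, no mutation).
-- Port of A. Indexing uses pyGetD with default 0: inside the loop 1 <= i < len, so both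
-- accesses are in range and Python's lista_numerica[i] / [i-1] never raises; pyGetD is exact there.
def confere_lista (lista_numerica : List Int) : String :=
  let cd := (PySem.List.pyRange 1 (PySem.List.len lista_numerica)).foldl
    (fun (p : Bool × Bool) i =>
      if PySem.List.pyGetD lista_numerica i 0 > PySem.List.pyGetD lista_numerica (i-1) 0 then
        (p.1, false)
      else if PySem.List.pyGetD lista_numerica i 0 < PySem.List.pyGetD lista_numerica (i-1) 0 then
        (false, p.2)
      else p) (true, true)
  if cd.1 then "crescente"
  else if cd.2 then "decrescente"
  else "não ordenada"

-- ===== PORT B =====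
def confere_lista_alt (lista_numerica : List Int) : String :=
  if lista_numerica = PySem.List.sorted lista_numerica (fun x => x) then "crescente"
  else if lista_numerica = PySem.List.sorted lista_numerica (fun x => x) true then "decrescente"
  else "não ordenada"

-- ===== PRECONDITION & SPEC =====
def Spec_confere_lista (lista_numerica : List Int) (out : String) : Prop := out = confere_lista_alt lista_numerica
instance (lista_numerica : List Int) (out : String) : Decidable (Spec_confere_lista lista_numerica out) := by unfold Spec_confere_lista; infer_instance

-- ===== CLAIM (what is proved, stated in full; the proofs are below) =====
def Claim_equal_confere_lista : Prop := ∀ (lista_numerica : List Int), Dom_confere_lista lista_numerica → Spec_confere_lista lista_numerica (confere_lista lista_numerica)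

-- ===== LEMMAS AND PROOFS =====

-- A's loop only ever lowers the two flags; its result is the conjunction of the per-step tests.
lemma flags_foldl (f : Int → Int) (r : List Int) (c d : Bool) :
    r.foldl (fun (p : Bool × Bool) i =>
        if f i > f (i-1) then (p.1, false)
        else if f i < f (i-1) then (false, p.2)
        else p) (c, d)
    = (c && r.all (fun i => ! decide (f i < f (i-1))),
       d && r.all (fun i => ! decide (f (i-1) < f i))) := by
  induction r generalizing c d with
  | nil => simp
  | cons x t ih =>
    simp only [List.foldl_cons, List.all_cons]
    split_ifs with h1 h2
    · rw [ih]
      have h1' : ¬ (f x < f (x-1)) := by omega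
      simp [h1, h1']
    · rw [ih]
      have h2' : ¬ (f (x-1) < f x) := by omega
      simp [h2, h2']
    · rw [ih]
      simp only [gt_iff_lt] at h1
      simp [h1, h2]

-- The ascending test of the loop says exactly: every adjacent pair is non-decreasing.
lemma all_range_le (xs : List Int) :
    ((PySem.List.pyRange 1 (PySem.List.len xs)).all
        (fun i => ! decide (PySem.List.pyGetD xs i 0 < PySem.List.pyGetD xs (i-1) 0)) = true)
      ↔ xs.Pairwise (· ≤ ·) := by
  rw [← List.isChain_iff_pairwise, List.isChain_iff_getElem, List.all_eq_true]
  constructor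
  · intro h j hj
    have hm : ((j : Int) + 1) ∈ PySem.List.pyRange 1 (PySem.List.len xs) := by
      rw [PySem.List.mem_pyRange_one]
      simp only [PySem.List.len_eq]
      omega
    have := h _ hm
    rw [PySem.List.pyGetD_eq_getElem xs 0 (by omega) (by omega),
        PySem.List.pyGetD_eq_getElem xs 0 (by omega) (by omega)] at this
    simp only [Bool.not_eq_eq_eq_not, Bool.not_true, decide_eq_false_iff_not, not_lt] at this
    have e1 : ((j : Int) + 1).toNat = j + 1 := by omega
    have e2 : ((j : Int) + 1 - 1).toNat = j := by omega
    simp only [e1, e2] at this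
    exact this
  · intro h i hi
    rw [PySem.List.mem_pyRange_one] at hi
    simp only [PySem.List.len_eq] at hi
    rw [PySem.List.pyGetD_eq_getElem xs 0 (by omega) (by omega),
        PySem.List.pyGetD_eq_getElem xs 0 (by omega) (by omega)]
    simp only [Bool.not_eq_eq_eq_not, Bool.not_true, decide_eq_false_iff_not, not_lt]
    have e : (i - 1).toNat + 1 = i.toNat := by omega
    have := h (i - 1).toNat (by omega)
    simp only [e] at this
    exact this

-- The descending test of the loop says exactly: every adjacent pair is non-increasing.
lemma all_range_ge (xs : List Int) :
    ((PySem.List.pyRange 1 (PySem.List.len xs)).all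
        (fun i => ! decide (PySem.List.pyGetD xs (i-1) 0 < PySem.List.pyGetD xs i 0)) = true)
      ↔ xs.Pairwise (fun a b => b ≤ a) := by
  rw [← List.isChain_iff_pairwise, List.isChain_iff_getElem, List.all_eq_true]
  constructor
  · intro h j hj
    have hm : ((j : Int) + 1) ∈ PySem.List.pyRange 1 (PySem.List.len xs) := by
      rw [PySem.List.mem_pyRange_one]
      simp only [PySem.List.len_eq]
      omega
    have := h _ hm
    rw [PySem.List.pyGetD_eq_getElem xs 0 (by omega) (by omega),
        PySem.List.pyGetD_eq_getElem xs 0 (by omega) (by omega)] at this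
    simp only [Bool.not_eq_eq_eq_not, Bool.not_true, decide_eq_false_iff_not, not_lt] at this
    have e1 : ((j : Int) + 1).toNat = j + 1 := by omega
    have e2 : ((j : Int) + 1 - 1).toNat = j := by omega
    simp only [e1, e2] at this
    exact this
  · intro h i hi
    rw [PySem.List.mem_pyRange_one] at hi
    simp only [PySem.List.len_eq] at hi
    rw [PySem.List.pyGetD_eq_getElem xs 0 (by omega) (by omega),
        PySem.List.pyGetD_eq_getElem xs 0 (by omega) (by omega)]
    simp only [Bool.not_eq_eq_eq_not, Bool.not_true, decide_eq_false_iff_not, not_lt]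
    have e : (i - 1).toNat + 1 = i.toNat := by omega
    have := h (i - 1).toNat (by omega)
    simp only [e] at this
    exact this

-- B's ascending test names the same property.
lemma sorted_id_eq_iff (xs : List Int) :
    xs = PySem.List.sorted xs (fun x => x) ↔ xs.Pairwise (· ≤ ·) := by
  constructor
  · intro h
    have := PySem.List.sorted_pairwise xs (fun x => x)
    rw [← h] at this
    exact this
  · intro h
    exact (PySem.List.sorted_eq_self_of_pairwise xs (fun x => x) h).symm

-- B's descending test names the same property.
lemma sorted_rev_id_eq_iff (xs : List Int) :
    xs = PySem.List.sorted xs (fun x => x) true ↔ xs.Pairwise (fun a b => b ≤ a) := by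
  constructor
  · intro h
    have := PySem.List.sorted_pairwise_rev xs (fun x => x)
    rw [← h] at this
    exact this
  · intro h
    exact (PySem.List.sorted_rev_eq_self_of_pairwise xs (fun x => x) h).symm

-- ===== VERDICT (by name: the statement is the Claim_ definition above) =====
theorem confere_lista_spec : Claim_equal_confere_lista := by
  intro xs _
  unfold Spec_confere_lista confere_lista confere_lista_alt
  rw [flags_foldl (fun i => PySem.List.pyGetD xs i 0)]
  simp only [Bool.true_and]
  by_cases hc : xs.Pairwise (· ≤ ·)
  · rw [if_pos ((all_range_le xs).mpr hc), if_pos ((sorted_id_eq_iff xs).mpr hc)]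
  · rw [if_neg (fun h => hc ((all_range_le xs).mp h)),
        if_neg (fun h => hc ((sorted_id_eq_iff xs).mp h))]
    by_cases hd : xs.Pairwise (fun a b => b ≤ a)
    · rw [if_pos ((all_range_ge xs).mpr hd), if_pos ((sorted_rev_id_eq_iff xs).mpr hd)]
    · rw [if_neg (fun h => hd ((all_range_ge xs).mp h)),
          if_neg (fun h => hd ((sorted_rev_id_eq_iff xs).mp h))]
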